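-- pv_equiv track=rewrite | github.com/arbazpathan91/ai_docfix | ai_docfix/hook.py | extract_function_signature
-- ===== SOURCE A (Python) =====
-- from typing import List, Optional
--
-- def extract_function_signature(lines: List[str], line_no: int) -> str:
--     """
--     Extract function signature with clear markers.
--
--     Captures the definition line and up to 5 subsequent lines to
--     handle multi-line arguments, plus a bit of the body for context.
--     """
--     start = line_no
--     sig_lines = [lines[start]]
--     i = start + 1
--
--     # Collect full signature (heuristically up to 5 lines)
--     # Stop if we hit the end of the signature or indentation changes significantly
--     while (i < len(lines) and i < start + 5):
--         line = lines[i].strip()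
--
--         # Heuristic to detect end of signature or start of body
--         if line.endswith(":") and not line.startswith("#"):
--             sig_lines.append(lines[i])
--             i += 1
--             break
--
--         sig_lines.append(lines[i])
--         i += 1
--
--     # Add 1 line of body context to help LLM understand logic
--     if i < len(lines):
--         sig_lines.append(lines[i])
--
--     signature = "\n".join(sig_lines)
--
--     return (
--         "=== FUNCTION/CLASS TO DOCUMENT ===\n" +
--         signature +
--         "\n=== END FUNCTION/CLASS ==="
--     )
-- ===== SOURCE B (Python) =====
-- def _after(lines, start, i):
--     # Recursively emit the rest of the signature text, the single
--     # body-context line and the closing marker, with no list building.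
--     if i >= len(lines):
--         return "\n=== END FUNCTION/CLASS ==="
--     if i >= start + 5:
--         return "\n" + lines[i] + "\n=== END FUNCTION/CLASS ==="
--     s = lines[i].strip()
--     if s.endswith(":") and not s.startswith("#"):
--         body = "\n" + lines[i + 1] if i + 1 < len(lines) else ""
--         return "\n" + lines[i] + body + "\n=== END FUNCTION/CLASS ==="
--     return "\n" + lines[i] + _after(lines, start, i + 1)
--
--
-- def extract_function_signature(lines, line_no):
--     return (
--         "=== FUNCTION/CLASS TO DOCUMENT ===\n"
--         + lines[line_no]
--         + _after(lines, line_no, line_no + 1)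
--     )
-- ===== Notes on version B (the rewrite author's own statement) =====
-- stated objective: alternative
-- what changed: B is a single recursive emitter: one recursion walks the lines and builds the final output string directly by concatenation (closing marker emitted from the recursion's base cases, the body-context line handled inside the stop branch), replacing A's imperative while-loop that accumulates a list of lines, the separate post-loop body-context append, and the final join/wrap stage.
import Mathlib
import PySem

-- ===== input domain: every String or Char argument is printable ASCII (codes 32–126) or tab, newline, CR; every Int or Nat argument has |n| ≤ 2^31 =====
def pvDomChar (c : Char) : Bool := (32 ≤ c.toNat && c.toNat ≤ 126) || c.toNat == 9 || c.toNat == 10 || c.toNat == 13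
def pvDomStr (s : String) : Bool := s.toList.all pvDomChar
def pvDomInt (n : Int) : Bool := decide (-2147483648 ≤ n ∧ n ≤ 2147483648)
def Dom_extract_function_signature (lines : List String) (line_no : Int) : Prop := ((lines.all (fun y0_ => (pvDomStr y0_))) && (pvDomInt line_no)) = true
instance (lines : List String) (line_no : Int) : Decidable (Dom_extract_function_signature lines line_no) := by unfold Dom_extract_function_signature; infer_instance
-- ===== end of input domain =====

-- B replaces A's list-accumulating while loop + join by a single recursion that
-- emits the output string directly (objective: alternative decomposition, not faster).
-- Equivalence of the RETURN values is proved on in-range line_no (A raises IndexError otherwise).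

-- ===== PORT A =====
-- the per-iteration "end of signature" test, exactly A's `line.endswith(":") and not line.startswith("#")` on the stripped line
def pvSigStop (s : String) : Bool :=
  let line := PySem.Str.strip s
  PySem.Str.endswith line ":" && !PySem.Str.startswith line "#"

-- A's while loop: state (i, sig_lines); fuel bounds the iterations (the loop runs at most 4 times, i < start+5)
def pvALoop (lines : List String) (start : Int) : Nat → Int → List String → Int × List String
  | 0, i, acc => (i, acc)
  | fuel + 1, i, acc =>
    if i < (lines.length : Int) ∧ i < start + 5 then
      let cur := (PySem.List.pyGet? lines i).getD ""
      if pvSigStop cur then (i + 1, acc ++ [cur])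
      else pvALoop lines start fuel (i + 1) (acc ++ [cur])
    else (i, acc)

def extract_function_signature (lines : List String) (line_no : Int) : String :=
  let start := line_no
  let sig0 := [(PySem.List.pyGet? lines start).getD ""]
  let r := pvALoop lines start 4 (start + 1) sig0
  let i := r.1
  let sig := r.2
  let sig := if i < (lines.length : Int) then sig ++ [(PySem.List.pyGet? lines i).getD ""] else sig
  let signature := PySem.Str.join "\n" sig
  "=== FUNCTION/CLASS TO DOCUMENT ===\n" ++ signature ++ "\n=== END FUNCTION/CLASS ==="

-- ===== PORT B =====
-- Source B's _after: recursion on (start+5 - i), realised as structural recursion on fuel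
-- (fuel is only a totality guard; with fuel ≥ start+5-i the 0-branch is never taken)
def pvAfter (lines : List String) (start : Int) : Nat → Int → String
  | 0, i =>
    -- fuel-exhausted guard (unreachable when fuel ≥ start+5-i): same non-recursive branches
    if ¬ i < (lines.length : Int) then "\n=== END FUNCTION/CLASS ==="
    else if ¬ i < start + 5 then
      "\n" ++ (PySem.List.pyGet? lines i).getD "" ++ "\n=== END FUNCTION/CLASS ==="
    else
      let s := PySem.Str.strip ((PySem.List.pyGet? lines i).getD "")
      if PySem.Str.endswith s ":" && !PySem.Str.startswith s "#" then
        let body := if i + 1 < (lines.length : Int) then "\n" ++ (PySem.List.pyGet? lines (i + 1)).getD "" else ""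
        "\n" ++ (PySem.List.pyGet? lines i).getD "" ++ body ++ "\n=== END FUNCTION/CLASS ==="
      else
        "\n" ++ (PySem.List.pyGet? lines i).getD "" ++ "\n=== END FUNCTION/CLASS ==="
  | fuel + 1, i =>
    if ¬ i < (lines.length : Int) then "\n=== END FUNCTION/CLASS ==="
    else if ¬ i < start + 5 then
      "\n" ++ (PySem.List.pyGet? lines i).getD "" ++ "\n=== END FUNCTION/CLASS ==="
    else
      let s := PySem.Str.strip ((PySem.List.pyGet? lines i).getD "")
      if PySem.Str.endswith s ":" && !PySem.Str.startswith s "#" then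
        let body := if i + 1 < (lines.length : Int) then "\n" ++ (PySem.List.pyGet? lines (i + 1)).getD "" else ""
        "\n" ++ (PySem.List.pyGet? lines i).getD "" ++ body ++ "\n=== END FUNCTION/CLASS ==="
      else
        "\n" ++ (PySem.List.pyGet? lines i).getD "" ++ pvAfter lines start fuel (i + 1)

def extract_function_signature_alt (lines : List String) (line_no : Int) : String :=
  "=== FUNCTION/CLASS TO DOCUMENT ===\n" ++
    (PySem.List.pyGet? lines line_no).getD "" ++
    pvAfter lines line_no 4 (line_no + 1)

-- ===== PRECONDITION & SPEC =====
-- A raises IndexError iff line_no is out of range (line_no < -len(lines) or line_no ≥ len(lines)); only those inputs are excluded.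
def Pre_extract_function_signature (lines : List String) (line_no : Int) : Prop :=
  -(lines.length : Int) ≤ line_no ∧ line_no < (lines.length : Int)
instance (lines : List String) (line_no : Int) : Decidable (Pre_extract_function_signature lines line_no) := by unfold Pre_extract_function_signature; infer_instance

def pvWitness_extract_function_signature : List String × Int :=
  (["def f(a,", "       b):", "    return a"], 0)

def Spec_extract_function_signature (lines : List String) (line_no : Int) (out : String) : Prop := out = extract_function_signature_alt lines line_no
instance (lines : List String) (line_no : Int) (out : String) : Decidable (Spec_extract_function_signature lines line_no out) := by unfold Spec_extract_function_signature; infer_instance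

-- ===== CLAIM =====
def Claim_equal_extract_function_signature : Prop := ∀ (lines : List String) (line_no : Int), Dom_extract_function_signature lines line_no → Pre_extract_function_signature lines line_no → Spec_extract_function_signature lines line_no (extract_function_signature lines line_no)

-- ===== LEMMAS AND PROOFS =====

theorem chars_join_append (c : List Char) :
    ∀ (ls : List (List Char)), ls ≠ [] →
      PySem.Chars.join ['\n'] (ls ++ [c]) = PySem.Chars.join ['\n'] ls ++ '\n' :: c := by
  intro ls
  induction ls with
  | nil => intro h; exact absurd rfl h
  | cons a t ih =>
    intro _
    cases t with
    | nil =>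
      rw [show ([a] : List (List Char)) ++ [c] = [a, c] from by simp,
        PySem.Chars.join_cons_cons, PySem.Chars.join_singleton, PySem.Chars.join_singleton]
      simp
    | cons b t2 =>
      rw [show (a :: b :: t2) ++ [c] = a :: b :: (t2 ++ [c]) from by simp,
        PySem.Chars.join_cons_cons,
        show b :: (t2 ++ [c]) = (b :: t2) ++ [c] from by simp,
        ih (by simp), PySem.Chars.join_cons_cons]
      simp

theorem str_join_append (acc : List String) (x : String) (h : acc ≠ []) :
    PySem.Str.join "\n" (acc ++ [x]) = PySem.Str.join "\n" acc ++ "\n" ++ x := by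
  apply String.toList_inj.mp
  simp [PySem.Str.join, chars_join_append x.toList (acc.map String.toList)
    (by simpa using h)]

-- the invariant of A's loop against B's recursion
theorem pvALoop_eq_after (lines : List String) (start : Int) :
    ∀ (fuel : Nat) (i : Int) (acc : List String), acc ≠ [] →
      i ≤ start + 5 → start + 5 ≤ i + fuel →
      (let r := pvALoop lines start fuel i acc;
        PySem.Str.join "\n"
          (if r.1 < (lines.length : Int) then r.2 ++ [(PySem.List.pyGet? lines r.1).getD ""] else r.2))
        ++ "\n=== END FUNCTION/CLASS ===" =
      PySem.Str.join "\n" acc ++ pvAfter lines start fuel i := by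
  intro fuel
  induction fuel with
  | zero =>
    intro i acc hacc h1 h2
    have hi : i = start + 5 := by omega
    subst hi
    simp only [pvALoop, pvAfter]
    by_cases hn : start + 5 < (lines.length : Int)
    · simp only [if_pos hn, if_neg (by omega : ¬ ¬ start + 5 < (lines.length : Int)),
        if_pos (by omega : ¬ (start + 5 : Int) < start + 5)]
      rw [str_join_append _ _ hacc]
      simp [String.append_assoc]
    · simp [hn]
  | succ fuel ih =>
    intro i acc hacc h1 h2
    by_cases hn : i < (lines.length : Int)
    · by_cases h5 : i < start + 5
      · simp only [pvALoop, if_pos (And.intro hn h5), pvAfter,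
          if_neg (by omega : ¬ ¬ i < (lines.length : Int)),
          if_neg (by omega : ¬ ¬ i < start + 5)]
        by_cases hstop : pvSigStop ((PySem.List.pyGet? lines i).getD "")
        · have hstop' : (PySem.Str.endswith (PySem.Str.strip ((PySem.List.pyGet? lines i).getD "")) ":"
              && !PySem.Str.startswith (PySem.Str.strip ((PySem.List.pyGet? lines i).getD "")) "#") = true := by
            simpa [pvSigStop] using hstop
          simp only [if_pos hstop, hstop', if_true]
          by_cases hb : i + 1 < (lines.length : Int)
          · simp only [if_pos hb]
            rw [str_join_append _ _ (by simp), str_join_append _ _ hacc]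
            simp [String.append_assoc]
          · simp only [if_neg hb]
            rw [str_join_append _ _ hacc]
            simp [String.append_assoc]
        · have hstop' : (PySem.Str.endswith (PySem.Str.strip ((PySem.List.pyGet? lines i).getD "")) ":"
              && !PySem.Str.startswith (PySem.Str.strip ((PySem.List.pyGet? lines i).getD "")) "#") = false := by
            simpa [pvSigStop] using hstop
          simp only [if_neg hstop, hstop', Bool.false_eq_true, if_false]
          rw [ih (i + 1) (acc ++ [(PySem.List.pyGet? lines i).getD ""]) (by simp) (by omega) (by omega),
            str_join_append _ _ hacc]
          simp [String.append_assoc]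
      · have hi : i = start + 5 := by omega
        subst hi
        simp only [pvALoop, if_neg (by omega : ¬ ((start + 5 : Int) < (lines.length : Int) ∧ start + 5 < start + 5)),
          pvAfter, if_neg (by omega : ¬ ¬ (start + 5 : Int) < (lines.length : Int)),
          if_pos (by omega : ¬ (start + 5 : Int) < start + 5)]
        simp only [if_pos hn]
        rw [str_join_append _ _ hacc]
        simp [String.append_assoc]
    · simp only [pvALoop, if_neg (by omega : ¬ (i < (lines.length : Int) ∧ i < start + 5)),
        pvAfter, if_pos (by omega : ¬ i < (lines.length : Int))]
      simp [hn]

theorem str_join_singleton (x : String) : PySem.Str.join "\n" [x] = x := by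
  apply String.toList_inj.mp
  simp [PySem.Str.join, PySem.Chars.join_singleton]

-- ===== VERDICT =====
theorem extract_function_signature_spec : Claim_equal_extract_function_signature := by
  intro lines line_no _hDom _hPre
  simp only [Spec_extract_function_signature, extract_function_signature,
    extract_function_signature_alt]
  have h := pvALoop_eq_after lines line_no 4 (line_no + 1)
    [(PySem.List.pyGet? lines line_no).getD ""] (by simp) (by omega) (by omega)
  simp only [str_join_singleton] at h
  rw [String.append_assoc, String.append_assoc, ← h]
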